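-- pv_equiv track=rewrite | github.com/projectkorea/study-codingtest-thisis | 2주차/프로그래머스/완전탐색_모의고사_재풀이.py | solution
-- ===== SOURCE A (Python) =====
-- def solution(answers):
--     answer = []
--
--     # 패턴 입력
--     no1 = [1,2,3,4,5]
--     no2 = [2,1,2,3,2,4,2,5]
--     no3 = [3,3,1,1,2,2,4,4,5,5]
--     count = [0,0,0]
--     # 인덱스가 없어서 list index out of range뜸
--
--     # i%배열의크기를 이용한 인덱스 주기 활용
--     for idx,val in enumerate(answers):
--         if answers[idx] == no1[idx%len(no1)]:
--             count[0] +=1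
--         if answers[idx] == no2[idx%len(no2)]:
--             count[1] +=1
--         if answers[idx] == no3[idx%len(no3)]:
--             count[2] +=1
--
--     # max값을 활용하여 answer에 답 추가
--     max_val = max(count)
--     answer =[]
--     for i in range(1,4):
--         if count[i-1] == max_val:
--             answer.append(i)
--
--     return answer
-- ===== SOURCE B (Python) =====
-- def solution(answers):
--     # All three supervisor patterns are periodic with periods 5, 8, 10, whose lcm is 40,
--     # so a pattern's score depends only on the histogram of (index % 40, value) pairs.
--     # Build that histogram in one pass (no pattern comparisons), then score each
--     # pattern with 40 table lookups.
--     PERIOD = 40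
--     freq = {}
--     for i, a in enumerate(answers):
--         key = (i % PERIOD, a)
--         freq[key] = freq.get(key, 0) + 1
--     patterns = [[1, 2, 3, 4, 5], [2, 1, 2, 3, 2, 4, 2, 5], [3, 3, 1, 1, 2, 2, 4, 4, 5, 5]]
--     scores = [sum(freq.get((j, p[j % len(p)]), 0) for j in range(PERIOD))
--               for p in patterns]
--     best = max(scores)
--     return [k + 1 for k, s in enumerate(scores) if s == best]
-- ===== Notes on version B (the rewrite author's own statement) =====
-- stated objective: alternative
-- what changed: B never compares answers against patterns element-by-element: it builds a frequency dictionary of (index mod 40, value) pairs in one pass (40 = lcm of the pattern periods 5, 8, 10) and then reads each pattern's score off that table with 40 lookups, instead of A's single loop with three hard-coded per-pattern comparisons and counter updates.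
import Mathlib
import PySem

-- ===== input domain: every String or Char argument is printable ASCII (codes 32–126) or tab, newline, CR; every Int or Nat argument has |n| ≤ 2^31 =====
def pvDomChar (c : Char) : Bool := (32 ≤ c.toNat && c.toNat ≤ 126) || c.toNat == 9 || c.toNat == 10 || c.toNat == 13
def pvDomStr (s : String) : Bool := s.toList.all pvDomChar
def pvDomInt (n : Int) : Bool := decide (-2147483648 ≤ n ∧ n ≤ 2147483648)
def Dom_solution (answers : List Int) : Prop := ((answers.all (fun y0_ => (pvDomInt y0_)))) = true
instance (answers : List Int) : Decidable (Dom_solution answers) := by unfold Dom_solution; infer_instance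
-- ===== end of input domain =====

-- B scores the patterns from a (index mod 40, value) frequency table (40 = lcm of the
-- pattern periods) instead of A's per-element comparisons against all three patterns
-- (objective: alternative).

-- ===== PORT A =====
-- matchA pat p : does answers[idx] (= p.2 under enumerate) equal pattern pat at idx % len(pat)?
-- index is always in range (0 ≤ idx % len < len), so pyGetD with default 0 is exact here.
def matchA (pat : List Int) (p : Int × Int) : Bool :=
  p.2 == PySem.List.pyGetD pat (PySem.Int.mod p.1 (PySem.List.len pat)) 0

def no1A : List Int := [1, 2, 3, 4, 5]
def no2A : List Int := [2, 1, 2, 3, 2, 4, 2, 5]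
def no3A : List Int := [3, 3, 1, 1, 2, 2, 4, 4, 5, 5]

-- the loop body: three independent 'if's updating count[0], count[1], count[2]
def stepA (c : Int × Int × Int) (p : Int × Int) : Int × Int × Int :=
  let c := if matchA no1A p then (c.1 + 1, c.2.1, c.2.2) else c
  let c := if matchA no2A p then (c.1, c.2.1 + 1, c.2.2) else c
  if matchA no3A p then (c.1, c.2.1, c.2.2 + 1) else c

def solution (answers : List Int) : List Int :=
  let c := (PySem.List.enumerate answers).foldl stepA (0, 0, 0)
  let count : List Int := [c.1, c.2.1, c.2.2]
  -- max(count): count has length 3, so max never raises; getD 0 is unreachable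
  let max_val : Int := ((PySem.List.max? count id).getD 0)
  (PySem.List.pyRange 1 4 1).foldl
    (fun answer i => if PySem.List.pyGetD count (i - 1) 0 == max_val then answer ++ [i] else answer) []

-- ===== PORT B =====
def patternsB : List (List Int) := [[1, 2, 3, 4, 5], [2, 1, 2, 3, 2, 4, 2, 5], [3, 3, 1, 1, 2, 2, 4, 4, 5, 5]]

-- key = (i % 40, a)
def keyB (p : Int × Int) : Int × Int := (PySem.Int.mod p.1 40, p.2)

-- freq[key] = freq.get(key, 0) + 1, over enumerate(answers)
def freqB (answers : List Int) : PySem.Dict (Int × Int) Int :=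
  (PySem.List.enumerate answers).foldl
    (fun d p => d.insert (keyB p) (d.getD (keyB p) 0 + 1)) PySem.Dict.empty

-- sum(freq.get((j, p[j % len(p)]), 0) for j in range(40))
def scoreB (freq : PySem.Dict (Int × Int) Int) (pat : List Int) : Int :=
  (PySem.List.pyRange 0 40 1).foldl
    (fun acc j => acc + freq.getD (j, PySem.List.pyGetD pat (PySem.Int.mod j (PySem.List.len pat)) 0) 0) 0

def solution_alt (answers : List Int) : List Int :=
  let freq := freqB answers
  let scores : List Int := patternsB.map (scoreB freq)
  let best : Int := ((PySem.List.max? scores id).getD 0)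
  (PySem.List.enumerate scores).filterMap (fun p => if p.2 == best then some (p.1 + 1) else none)

-- ===== PRECONDITION & SPEC =====
def Spec_solution (answers : List Int) (out : List Int) : Prop := out = solution_alt answers
instance (answers : List Int) (out : List Int) : Decidable (Spec_solution answers out) := by unfold Spec_solution; infer_instance

-- ===== CLAIM (what is proved, stated in full; the proofs are below) =====
def Claim_equal_solution : Prop := ∀ (answers : List Int), Dom_solution answers → Spec_solution answers (solution answers)

-- ===== LEMMAS AND PROOFS =====

-- A's one fold with a triple accumulator computes the three per-pattern match counts
lemma foldA_counts (L : List (Int × Int)) (c0 c1 c2 : Int) :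
    L.foldl stepA (c0, c1, c2) =
      (c0 + (L.countP (matchA no1A) : Int),
       c1 + (L.countP (matchA no2A) : Int),
       c2 + (L.countP (matchA no3A) : Int)) := by
  induction L generalizing c0 c1 c2 with
  | nil => simp
  | cons x xs ih =>
    simp only [List.foldl_cons, List.countP_cons, stepA]
    by_cases h1 : matchA no1A x <;> by_cases h2 : matchA no2A x <;> by_cases h3 : matchA no3A x <;>
      simp [h1, h2, h3, ih, Prod.ext_iff] <;> omega

-- only row j = r of the 40-row table can match a pair whose residue is r
lemma sum_ite_single (v : Int → Int) (r a : Int) (h0 : 0 ≤ r) (h40 : r < 40) :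
    ((PySem.List.pyRange 0 40 1).map
      (fun j => if ((r, a) == (j, v j) : Bool) then (1 : Int) else 0)).sum
      = if a = v r then 1 else 0 := by
  have hr : PySem.List.pyRange 0 40 1 =
      [0,1,2,3,4,5,6,7,8,9,10,11,12,13,14,15,16,17,18,19,20,21,22,23,24,25,
       26,27,28,29,30,31,32,33,34,35,36,37,38,39] := by decide
  rw [hr]
  interval_cases r <;> simp [Prod.ext_iff]

-- swap the two sums: total of the 40 per-row counts = one count over the pairs
lemma sum_countP_rows (v : Int → Int) (L : List (Int × Int)) (h : ∀ p ∈ L, 0 ≤ p.1) :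
    ((PySem.List.pyRange 0 40 1).map
      (fun j => (L.countP (fun p => keyB p == (j, v j)) : Int))).sum
      = (L.countP (fun p => p.2 == v (PySem.Int.mod p.1 40)) : Int) := by
  induction L with
  | nil => simp
  | cons x xs ih =>
    have hxs : ∀ p ∈ xs, 0 ≤ p.1 := fun p hp => h p (List.mem_cons_of_mem _ hp)
    simp only [List.countP_cons, keyB] at ih ⊢
    push_cast
    have hsplit :
        ((PySem.List.pyRange 0 40 1).map
          (fun j => ((xs.countP (fun p => (PySem.Int.mod p.1 40, p.2) == (j, v j)) : Int)
            + if ((PySem.Int.mod x.1 40, x.2) == (j, v j) : Bool) then (1 : Int) else 0))).sum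
        = ((PySem.List.pyRange 0 40 1).map
            (fun j => (xs.countP (fun p => (PySem.Int.mod p.1 40, p.2) == (j, v j)) : Int))).sum
          + ((PySem.List.pyRange 0 40 1).map
            (fun j => if ((PySem.Int.mod x.1 40, x.2) == (j, v j) : Bool) then (1 : Int) else 0)).sum :=
      PySem.List.sum_map_add_int _ _ _
    rw [hsplit, ih hxs,
      sum_ite_single v (PySem.Int.mod x.1 40) x.2
        (PySem.Int.mod_nonneg x.1 (by norm_num))
        (PySem.Int.mod_lt x.1 (by norm_num))]
    simp

-- for each of the three patterns (period dividing 40), the table score is A's match count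
lemma scoreB_eq_countP (answers : List Int) (pat : List Int)
    (hlen : 0 < (pat.length : Int)) (hdvd : (pat.length : Int) ∣ 40) :
    scoreB (freqB answers) pat = ((PySem.List.enumerate answers).countP (matchA pat) : Int) := by
  unfold scoreB freqB
  rw [PySem.List.foldl_add]
  have hcounter :
      (PySem.List.enumerate answers).foldl
        (fun d p => d.insert (keyB p) (d.getD (keyB p) 0 + 1)) PySem.Dict.empty
      = PySem.Dict.counter ((PySem.List.enumerate answers).map keyB) := by
    rw [← PySem.Dict.foldl_insert_getD_add_one_eq_counter, List.foldl_map]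
  rw [hcounter]
  set v : Int → Int := fun j => PySem.List.pyGetD pat (PySem.Int.mod j (PySem.List.len pat)) 0 with hv
  have hgetD : ∀ j : Int,
      (PySem.Dict.counter ((PySem.List.enumerate answers).map keyB)).getD (j, v j) 0
      = ((PySem.List.enumerate answers).countP (fun p => keyB p == (j, v j)) : Int) := by
    intro j
    rw [PySem.Dict.getD_counter]
    norm_cast
    simp [List.count_eq_countP, List.countP_map, Function.comp_def]
  have hnn : ∀ p ∈ PySem.List.enumerate answers, 0 ≤ p.1 := by
    intro p hp
    rcases (PySem.List.mem_enumerate_iff _ _ _).1 hp with ⟨k, hk, rfl⟩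
    simp
  calc 0 + ((PySem.List.pyRange 0 40 1).map
          (fun j => (PySem.Dict.counter ((PySem.List.enumerate answers).map keyB)).getD (j, v j) 0)).sum
      = ((PySem.List.pyRange 0 40 1).map
          (fun j => ((PySem.List.enumerate answers).countP (fun p => keyB p == (j, v j)) : Int))).sum := by
        rw [zero_add]; exact congrArg List.sum (List.map_congr_left (fun j _ => hgetD j))
    _ = ((PySem.List.enumerate answers).countP (fun p => p.2 == v (PySem.Int.mod p.1 40)) : Int) :=
        sum_countP_rows v _ hnn
    _ = ((PySem.List.enumerate answers).countP (matchA pat) : Int) := by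
        norm_cast
        refine List.countP_congr (fun p _ => ?_)
        have hmod : PySem.Int.mod (p.1 % 40) ((pat.length : Int))
            = PySem.Int.mod p.1 ((pat.length : Int)) := by
          rw [PySem.Int.mod_eq_emod_of_pos hlen, PySem.Int.mod_eq_emod_of_pos hlen]
          exact Int.emod_emod_of_dvd p.1 hdvd
        simp [matchA, hv, hmod]

-- the two final stages produce the same winners from the same three scores
lemma tails_eq (x y z : Int) :
    (PySem.List.pyRange 1 4 1).foldl
      (fun answer i => if PySem.List.pyGetD [x, y, z] (i - 1) 0 == ((PySem.List.max? [x, y, z] id).getD 0)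
                       then answer ++ [i] else answer) [] =
    (PySem.List.enumerate [x, y, z]).filterMap
      (fun p => if p.2 == ((PySem.List.max? [x, y, z] id).getD 0) then some (p.1 + 1) else none) := by
  have hr : PySem.List.pyRange 1 4 1 = [1, 2, 3] := by decide
  set m := ((PySem.List.max? [x, y, z] id).getD 0) with hm
  simp only [hr, List.foldl_cons, List.foldl_nil, PySem.List.enumerate, List.filterMap,
    PySem.List.pyGetD, PySem.List.pyGet?, PySem.List.pyIdx?]
  norm_num
  by_cases h1 : x = m <;> by_cases h2 : y = m <;> by_cases h3 : z = m <;>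
    simp [h1, h2, h3]

-- ===== VERDICT (by name: the statement is the Claim_ definition above) =====
theorem solution_spec : Claim_equal_solution := by
  intro answers _
  show solution answers = solution_alt answers
  unfold solution solution_alt
  rw [foldA_counts]
  have e1 : scoreB (freqB answers) [1,2,3,4,5]
      = ((PySem.List.enumerate answers).countP (matchA no1A) : Int) :=
    scoreB_eq_countP answers _ (by norm_num) (by norm_num)
  have e2 : scoreB (freqB answers) [2,1,2,3,2,4,2,5]
      = ((PySem.List.enumerate answers).countP (matchA no2A) : Int) :=
    scoreB_eq_countP answers _ (by norm_num) (by norm_num)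
  have e3 : scoreB (freqB answers) [3,3,1,1,2,2,4,4,5,5]
      = ((PySem.List.enumerate answers).countP (matchA no3A) : Int) :=
    scoreB_eq_countP answers _ (by norm_num) (by norm_num)
  simp only [patternsB, List.map, e1, e2, e3, zero_add]
  exact tails_eq _ _ _
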